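-- pv_equiv track=rewrite | github.com/elehtoranta/CS100 | 6_strings/count_abba.py | count_abbas
-- ===== SOURCE A (Python) =====
-- def count_abbas(string: str) -> int:
--     """
--     Counts a the number of times a legendary Swedish band appears
--     in a given string.
--
--     :param string: str, string to be searched for abba.
--     :return: int, number of occurances of abba.
--     """
--
--     string_len = len(string)
--     abbas: int = 0
--
--     for i in range(string_len):
--         if i + 3 >= string_len:
--             break
--         elif string[i:i+4] == "abba":
--             abbas += 1
--
--     return abbas
-- ===== SOURCE B (Python) =====
-- def count_abbas(string: str) -> int:
--     """Count (overlapping) occurrences of 'abba' by jumping between matches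
--     with str.find instead of slice-comparing at every index."""
--     abbas = 0
--     idx = string.find("abba")
--     while idx != -1:
--         abbas += 1
--         idx = string.find("abba", idx + 1)
--     return abbas
-- ===== Notes on version B (the rewrite author's own statement) =====
-- stated objective: faster
-- what changed: B jumps from match to match with str.find (restarting at idx+1 to keep overlapping counts) instead of slice-comparing string[i:i+4] at every index, so no per-index 4-char slice object is built.
import Mathlib
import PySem

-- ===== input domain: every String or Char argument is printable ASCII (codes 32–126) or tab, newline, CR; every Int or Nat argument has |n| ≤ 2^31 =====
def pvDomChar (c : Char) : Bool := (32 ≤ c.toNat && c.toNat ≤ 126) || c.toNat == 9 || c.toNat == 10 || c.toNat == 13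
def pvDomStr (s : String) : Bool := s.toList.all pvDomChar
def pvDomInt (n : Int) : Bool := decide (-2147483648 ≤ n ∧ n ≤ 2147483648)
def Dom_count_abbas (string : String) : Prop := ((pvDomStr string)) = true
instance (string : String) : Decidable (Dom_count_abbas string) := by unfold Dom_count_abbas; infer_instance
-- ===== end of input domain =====

-- B counts 'abba' occurrences by jumping match-to-match with str.find (restart at idx+1
-- to keep overlapping matches) instead of slice-comparing string[i:i+4] at every index.

-- ===== PORT A =====
-- A's for-loop over range(len) with break/slice-compare, as tail recursion on i.
def countA_loop (cs : List Char) (n i : Nat) (acc : Int) : Int :=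
  if i < n then
    if n ≤ i + 3 then acc
    else countA_loop cs n (i + 1)
      (if PySem.Chars.slice cs (some (i : Int)) (some ((i : Int) + 4)) = "abba".toList
       then acc + 1 else acc)
  else acc
termination_by n - i

def count_abbas (string : String) : Int :=
  countA_loop string.toList string.toList.length 0 0

-- ===== PORT B =====
-- B's while-loop over str.find results; fuel = len+1 is only a totality guard
-- (each found index is strictly larger, so at most len+1 iterations happen).
def countB_loop (cs : List Char) (fuel : Nat) (idx : Int) (acc : Int) : Int :=
  match fuel with
  | 0 => acc
  | f + 1 =>
    if idx = -1 then acc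
    else countB_loop cs f (PySem.Chars.findFrom cs "abba".toList (idx + 1) none) (acc + 1)

def count_abbas_alt (string : String) : Int :=
  countB_loop string.toList (string.toList.length + 1)
    (PySem.Chars.find string.toList "abba".toList) 0

-- ===== PRECONDITION & SPEC =====
def Spec_count_abbas (string : String) (out : Int) : Prop := out = count_abbas_alt string
instance (string : String) (out : Int) : Decidable (Spec_count_abbas string out) := by
  unfold Spec_count_abbas; infer_instance

-- ===== CLAIM (what is proved, stated in full; the proofs are below) =====
def Claim_equal_count_abbas : Prop := ∀ (string : String), Dom_count_abbas string → Spec_count_abbas string (count_abbas string)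

-- ===== LEMMAS AND PROOFS =====

-- number of match positions ≥ k
def pvCnt (cs : List Char) (k : Nat) : Nat :=
  (List.range' k (cs.length - k)).countP (fun j => decide ("abba".toList <+: cs.drop j))

theorem pv_prefix_len {cs : List Char} {j : Nat} (h : "abba".toList <+: cs.drop j) :
    j + 4 ≤ cs.length := by
  have := h.length_le
  simp [List.length_drop] at this
  omega

theorem pvCnt_step {cs : List Char} {k : Nat} (h : k < cs.length) :
    pvCnt cs k = (if "abba".toList <+: cs.drop k then 1 else 0) + pvCnt cs (k + 1) := by
  unfold pvCnt
  have h1 : cs.length - k = (cs.length - (k + 1)) + 1 := by omega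
  rw [h1, List.range'_succ, List.countP_cons]
  simp only [decide_eq_true_eq]
  split_ifs with hp <;> simp [Nat.add_comm]

theorem pvCnt_none {cs : List Char} {k : Nat}
    (h : ¬ "abba".toList <:+: cs.drop k) : pvCnt cs k = 0 := by
  unfold pvCnt
  rw [List.countP_eq_zero]
  intro j hj
  simp only [List.mem_range'] at hj
  simp only [decide_eq_true_eq]
  intro hp
  apply h
  have : "abba".toList <+: (cs.drop k).drop (j - k) := by
    rw [List.drop_drop]
    have h2 : k + (j - k) = j := by omega
    rw [h2]; exact hp
  rw [← PySem.Chars.isIn_iff_infix, ← PySem.Chars.exists_prefix_drop_iff_isIn]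
  exact ⟨j - k, this⟩

theorem pvCnt_skip (cs : List Char) (m : Nat) (hm : m ≤ cs.length) :
    ∀ d k, k + d = m → (∀ i, k ≤ i → i < m → ¬ "abba".toList <+: cs.drop i) →
      pvCnt cs k = pvCnt cs m := by
  intro d
  induction d with
  | zero => intro k hk _; simp_all
  | succ d ih =>
    intro k hk hno
    have hk' : k < cs.length := by omega
    rw [pvCnt_step hk']
    have : ¬ "abba".toList <+: cs.drop k := hno k le_rfl (by omega)
    rw [if_neg this]
    simpa using ih (k + 1) (by omega) (fun i hi₁ hi₂ => hno i (by omega) hi₂)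

theorem pv_loopA_eq (cs : List Char) :
    ∀ d i acc, cs.length - i ≤ d →
      countA_loop cs cs.length i acc = acc + pvCnt cs i := by
  intro d
  induction d with
  | zero =>
    intro i acc hd
    have : ¬ i < cs.length := by omega
    rw [countA_loop, if_neg this]
    unfold pvCnt
    have : cs.length - i = 0 := by omega
    simp [this]
  | succ d ih =>
    intro i acc hd
    by_cases hi : i < cs.length
    · rw [countA_loop, if_pos hi]
      by_cases hb : cs.length ≤ i + 3
      · rw [if_pos hb]
        have h0 : pvCnt cs i = 0 := by
          unfold pvCnt
          rw [List.countP_eq_zero]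
          intro j hj
          simp only [List.mem_range'] at hj
          simp only [decide_eq_true_eq]
          intro hp
          have := pv_prefix_len hp
          omega
        simp [h0]
      · rw [if_neg hb]
        have hslice : PySem.Chars.slice cs (some (i : Int)) (some ((i : Int) + 4))
            = (cs.drop i).take 4 := by
          have := PySem.List.slice_natCast_add cs i 4
          simpa using this
        have hiff : ((cs.drop i).take 4 = "abba".toList) ↔ ("abba".toList <+: cs.drop i) := by
          constructor
          · intro h; rw [← h]; exact List.take_prefix _ _
          · intro h
            have := List.prefix_iff_eq_take.mp h
            simpa using this.symm
        rw [ih (i + 1) _ (by omega)]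
        rw [pvCnt_step hi, hslice]
        by_cases hp : "abba".toList <+: cs.drop i
        · rw [if_pos (hiff.mpr hp), if_pos hp]; push_cast; ring
        · rw [if_neg (fun h => hp (hiff.mp h)), if_neg hp]; push_cast; ring
    · rw [countA_loop, if_neg hi]
      unfold pvCnt
      have : cs.length - i = 0 := by omega
      simp [this]

theorem pv_loopB_eq (cs : List Char) :
    ∀ fuel k acc, k ≤ cs.length → cs.length + 1 ≤ fuel + k →
      countB_loop cs fuel (PySem.Chars.findFrom cs "abba".toList (k : Int) none) acc
        = acc + pvCnt cs k := by
  intro fuel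
  induction fuel with
  | zero => intro k acc hk hf; omega
  | succ f ih =>
    intro k acc hk hf
    by_cases hj : PySem.Chars.findFrom cs "abba".toList (k : Int) none = -1
    · rw [countB_loop, if_pos hj]
      have hni := (PySem.Chars.findFrom_natCast_eq_neg_one_iff cs "abba".toList k hk).mp hj
      rw [pvCnt_none hni]
      simp
    · obtain ⟨hkj, hpre, hmin⟩ := PySem.Chars.findFrom_natCast_spec cs "abba".toList k hk hj
      set j := PySem.Chars.findFrom cs "abba".toList (k : Int) none with hjdef
      have hj0 : 0 ≤ j := le_trans (by positivity) hkj
      have hjn : j.toNat + 4 ≤ cs.length := pv_prefix_len hpre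
      have hkjn : k ≤ j.toNat := by omega
      rw [countB_loop, if_neg hj]
      have hcast : j + 1 = ((j.toNat + 1 : Nat) : Int) := by omega
      rw [hcast, ih (j.toNat + 1) (acc + 1) (by omega) (by omega)]
      have hskip : pvCnt cs k = pvCnt cs j.toNat :=
        pvCnt_skip cs j.toNat (by omega) (j.toNat - k) k (by omega)
          (fun i hi₁ hi₂ => hmin i hi₁ hi₂)
      have hstep : pvCnt cs j.toNat = 1 + pvCnt cs (j.toNat + 1) := by
        rw [pvCnt_step (by omega : j.toNat < cs.length), if_pos hpre]
      rw [hskip, hstep]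
      push_cast; ring

-- ===== VERDICT (by name: the statement is the Claim_ definition above) =====
theorem count_abbas_spec : Claim_equal_count_abbas := by
  intro string _
  unfold Spec_count_abbas count_abbas count_abbas_alt
  have hA := pv_loopA_eq string.toList string.toList.length 0 0 (by omega)
  have hB := pv_loopB_eq string.toList (string.toList.length + 1) 0 0 (by omega) (by omega)
  rw [hA]
  rw [show ((0 : Nat) : Int) = (0 : Int) by norm_num,
      PySem.Chars.findFrom_zero] at hB
  rw [hB]
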